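-- pv_equiv track=rewrite | github.com/mongodb/docs | code-example-tests/python/pymongo/utils/comparison/parser.py | _quote_unquoted_ellipsis
-- ===== SOURCE A (Python) =====
-- def _quote_unquoted_ellipsis(s: str) -> str:
--     """
--     Quote unquoted ellipsis (...) that appear as property values or array elements.
--
--     This function is string-aware and will NOT modify ellipsis that appear inside
--     quoted strings (e.g., a plot description ending with "...").
--
--     Handles two patterns:
--     1. Property values: { key: ... } becomes { key: "..." }
--     2. Array elements: [item, ...] becomes [item, "..."]
--
--     This aligns with mongosh commit 67d16af07bc and C# commit ddd298d9877.
--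
--     Args:
--         s (str): Input string (after quote conversion)
--
--     Returns:
--         str: String with unquoted ellipsis converted to quoted strings
--
--     Design Decision: Must be called after single-to-double quote conversion but
--     before JSON parsing to prevent Python's ast.literal_eval from interpreting
--     unquoted ... as the Ellipsis object.
--     """
--     result = []
--     i = 0
--     in_string = False
--
--     while i < len(s):
--         char = s[i]
--
--         # Track whether we're inside a string
--         if char == '"' and (i == 0 or s[i - 1] != '\\'):
--             in_string = not in_string
--             result.append(char)
--             i += 1
--         elif char == '.' and not in_string and s[i:i+3] == '...':
--             # Found potential ellipsis outside a string
--             # Check if this is an unquoted ellipsis that needs quoting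
--             # Look ahead to see what follows the ellipsis
--             after_ellipsis = s[i+3:i+4] if i+3 < len(s) else ''
--
--             # Check if followed by delimiter (whitespace, comma, closing brace/bracket)
--             if after_ellipsis in ('', ' ', '\t', '\n', '\r', ',', '}', ']'):
--                 # This is an unquoted ellipsis - quote it
--                 result.append('"..."')
--                 i += 3
--             else:
--                 # Not a standalone ellipsis, just copy the dot
--                 result.append(char)
--                 i += 1
--         else:
--             result.append(char)
--             i += 1
--
--     return ''.join(result)
-- ===== SOURCE B (Python) =====
-- # B: split the input at unescaped quotes into alternating outside/inside
-- # segments, rewrite '...' (followed by a delimiter, or at end of input) only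
-- # in outside segments, and rejoin with '"'.
--
-- def _split_at_quotes(s):
--     parts = []
--     cur = []
--     prev = None
--     for c in s:
--         if c == '"' and prev != '\\':
--             parts.append(''.join(cur))
--             cur = []
--         else:
--             cur.append(c)
--         prev = c
--     parts.append(''.join(cur))
--     return parts
--
--
-- def _sub_ellipsis(part, at_end):
--     out = []
--     i = 0
--     n = len(part)
--     while i < n:
--         c = part[i]
--         if c == '.' and part[i + 1:i + 3] == '..' and (
--             part[i + 3] in ' \t\n\r,}]' if i + 3 < n else at_end
--         ):
--             out.append('"..."')
--             i += 3
--         else: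
--             out.append(c)
--             i += 1
--     return ''.join(out)
--
--
-- def _quote_unquoted_ellipsis(s: str) -> str:
--     parts = _split_at_quotes(s)
--     out = []
--     for idx, part in enumerate(parts):
--         if idx % 2 == 0:
--             part = _sub_ellipsis(part, idx == len(parts) - 1)
--         out.append(part)
--     return '"'.join(out)
-- ===== Notes on version B (the rewrite author's own statement) =====
-- stated objective: alternative
-- what changed: A is a single character-by-character state machine toggling an in_string flag; B instead splits the input into segments at unescaped quotes, applies the ellipsis rewrite only to the even (outside-string) segments (end-of-input test only on the last segment), and rejoins the segments with '"'.
import Mathlib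
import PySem

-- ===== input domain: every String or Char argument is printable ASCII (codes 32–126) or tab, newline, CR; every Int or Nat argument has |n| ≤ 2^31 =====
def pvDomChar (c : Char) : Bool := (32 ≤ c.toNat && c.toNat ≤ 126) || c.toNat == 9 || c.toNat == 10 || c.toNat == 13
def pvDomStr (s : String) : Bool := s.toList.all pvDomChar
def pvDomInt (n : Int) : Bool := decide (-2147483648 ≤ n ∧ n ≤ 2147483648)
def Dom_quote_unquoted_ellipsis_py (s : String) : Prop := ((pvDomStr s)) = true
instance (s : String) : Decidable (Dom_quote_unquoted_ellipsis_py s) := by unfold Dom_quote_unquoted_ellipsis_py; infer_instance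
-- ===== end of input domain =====

-- B replaces A's single-pass in_string state machine by a different decomposition:
-- split at unescaped quotes, rewrite '...' only in the outside segments, rejoin with '"'.

-- ===== PORT A =====
-- the while loop over index i with in_string flag and result accumulator; the slices
-- s[i:i+3] / s[i+3:i+4] are ported as drop/take (exact for these nonnegative bounds).
def pvALoop (s : List Char) (i : Nat) (inStr : Bool) (acc : List Char) : List Char :=
  if h : i < s.length then
    if s[i] = '"' ∧ (i = 0 ∨ s[i-1]! ≠ '\\') then
      pvALoop s (i+1) (!inStr) (acc ++ [s[i]])
    else if s[i] = '.' ∧ inStr = false ∧ (s.drop i).take 3 = ['.', '.', '.'] then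
      -- after_ellipsis = s[i+3:i+4] if i+3 < len(s) else ''  (inlined below)
      if (if i + 3 < s.length then (s.drop (i+3)).take 1 else []) = [] ∨
         (if i + 3 < s.length then (s.drop (i+3)).take 1 else []) = [' '] ∨
         (if i + 3 < s.length then (s.drop (i+3)).take 1 else []) = ['\t'] ∨
         (if i + 3 < s.length then (s.drop (i+3)).take 1 else []) = ['\n'] ∨
         (if i + 3 < s.length then (s.drop (i+3)).take 1 else []) = ['\r'] ∨
         (if i + 3 < s.length then (s.drop (i+3)).take 1 else []) = [','] ∨
         (if i + 3 < s.length then (s.drop (i+3)).take 1 else []) = ['}'] ∨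
         (if i + 3 < s.length then (s.drop (i+3)).take 1 else []) = [']'] then
        pvALoop s (i+3) inStr (acc ++ ['"', '.', '.', '.', '"'])
      else
        pvALoop s (i+1) inStr (acc ++ [s[i]])
    else
      pvALoop s (i+1) inStr (acc ++ [s[i]])
  else acc
termination_by s.length - i

def quote_unquoted_ellipsis_py (s : String) : String :=
  String.ofList (pvALoop s.toList 0 false [])

-- ===== PORT B =====
-- _split_at_quotes: one pass carrying prev char, current segment and the segment list
def pvSplitGo (cs : List Char) (prev : Option Char) (cur : List Char)
    (parts : List (List Char)) : List (List Char) :=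
  match cs with
  | [] => parts ++ [cur]
  | c :: rest =>
    if c = '"' ∧ prev ≠ some '\\' then pvSplitGo rest (some c) [] (parts ++ [cur])
    else pvSplitGo rest (some c) (cur ++ [c]) parts

-- _sub_ellipsis: while loop over index i in one segment
def pvSubLoop (p : List Char) (i : Nat) (atEnd : Bool) (out : List Char) : List Char :=
  if h : i < p.length then
    if p[i] = '.' ∧ ((p.drop (i+1)).take 2 = ['.', '.']) ∧
        (if i + 3 < p.length then (p[i+3]! ∈ [' ', '\t', '\n', '\r', ',', '}', ']']) else atEnd = true) then
      pvSubLoop p (i+3) atEnd (out ++ ['"', '.', '.', '.', '"'])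
    else
      pvSubLoop p (i+1) atEnd (out ++ [p[i]])
  else out
termination_by p.length - i

-- the enumerate loop: rewrite even-indexed (outside) segments, the last one with at_end
def pvBGo (parts : List (List Char)) (idx : Nat) (total : Nat) : List (List Char) :=
  match parts with
  | [] => []
  | p :: ps =>
    (if idx % 2 = 0 then pvSubLoop p 0 (decide (idx = total - 1)) [] else p)
      :: pvBGo ps (idx + 1) total

def quote_unquoted_ellipsis_py_alt (s : String) : String :=
  let parts := pvSplitGo s.toList none [] []
  String.ofList (List.flatten (List.intersperse ['"'] (pvBGo parts 0 parts.length)))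

-- ===== PRECONDITION & SPEC =====
def Spec_quote_unquoted_ellipsis_py (s : String) (out : String) : Prop := out = quote_unquoted_ellipsis_py_alt s
instance (s : String) (out : String) : Decidable (Spec_quote_unquoted_ellipsis_py s out) := by unfold Spec_quote_unquoted_ellipsis_py; infer_instance

-- ===== CLAIM (what is proved, stated in full; the proofs are below) =====
def Claim_equal_quote_unquoted_ellipsis_py : Prop := ∀ (s : String), Dom_quote_unquoted_ellipsis_py s → Spec_quote_unquoted_ellipsis_py s (quote_unquoted_ellipsis_py s)

-- ===== LEMMAS AND PROOFS =====

def pvDelim (c : Char) : Bool :=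
  c = ' ' || c = '\t' || c = '\n' || c = '\r' || c = ',' || c = '}' || c = ']'

def pvDelimOpt : Option Char → Bool
  | none => true
  | some c => pvDelim c

-- structural version of A's loop over the suffix, carrying the previous char
def pvCore (prev : Option Char) (cs : List Char) (inStr : Bool) : List Char :=
  match cs with
  | [] => []
  | c :: rest =>
    if c = '"' ∧ prev ≠ some '\\' then
      '"' :: pvCore (some '"') rest (!inStr)
    else if c = '.' ∧ inStr = false ∧ rest.take 2 = ['.', '.'] ∧ pvDelimOpt (rest.drop 2).head? = true then
      '"' :: '.' :: '.' :: '.' :: '"' :: pvCore (some '.') (rest.drop 2) inStr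
    else
      c :: pvCore (some c) rest inStr
termination_by cs.length
decreasing_by all_goals (simp only [List.length_cons, List.length_drop]; omega)

-- structural version of _sub_ellipsis
def pvSubP (p : List Char) (atEnd : Bool) : List Char :=
  match p with
  | [] => []
  | c :: rest =>
    if c = '.' ∧ rest.take 2 = ['.', '.'] ∧ ((rest.drop 2).head?.elim atEnd pvDelim = true) then
      '"' :: '.' :: '.' :: '.' :: '"' :: pvSubP (rest.drop 2) atEnd
    else
      c :: pvSubP rest atEnd
termination_by p.length
decreasing_by all_goals (simp only [List.length_cons, List.length_drop]; omega)

-- structural split, returning (first segment, remaining segments)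
def pvSplitP (prev : Option Char) (cs : List Char) : List Char × List (List Char) :=
  match cs with
  | [] => ([], [])
  | c :: rest =>
    if c = '"' ∧ prev ≠ some '\\' then
      ([], (pvSplitP (some c) rest).1 :: (pvSplitP (some c) rest).2)
    else
      (c :: (pvSplitP (some c) rest).1, (pvSplitP (some c) rest).2)

-- render the segments back (outside segments rewritten)
def pvRenderP (p : List Char) (ps : List (List Char)) (outside : Bool) : List Char :=
  match ps, outside with
  | [], true => pvSubP p true
  | [], false => p
  | q :: qs, true => pvSubP p false ++ '"' :: pvRenderP q qs false
  | q :: qs, false => p ++ '"' :: pvRenderP q qs true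

-- step lemmas
theorem pvCore_nil (prev : Option Char) (inStr : Bool) : pvCore prev [] inStr = [] := by
  rw [pvCore]

theorem pvCore_cons (prev : Option Char) (c : Char) (rest : List Char) (inStr : Bool) :
    pvCore prev (c :: rest) inStr =
      if c = '"' ∧ prev ≠ some '\\' then
        '"' :: pvCore (some '"') rest (!inStr)
      else if c = '.' ∧ inStr = false ∧ rest.take 2 = ['.', '.'] ∧ pvDelimOpt (rest.drop 2).head? = true then
        '"' :: '.' :: '.' :: '.' :: '"' :: pvCore (some '.') (rest.drop 2) inStr
      else
        c :: pvCore (some c) rest inStr := by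
  rw [pvCore]

theorem pvSubP_nil (atEnd : Bool) : pvSubP [] atEnd = [] := by rw [pvSubP]

theorem pvSubP_cons (c : Char) (rest : List Char) (atEnd : Bool) :
    pvSubP (c :: rest) atEnd =
      if c = '.' ∧ rest.take 2 = ['.', '.'] ∧ ((rest.drop 2).head?.elim atEnd pvDelim = true) then
        '"' :: '.' :: '.' :: '.' :: '"' :: pvSubP (rest.drop 2) atEnd
      else
        c :: pvSubP rest atEnd := by
  rw [pvSubP]

theorem pvSplitP_cons (prev : Option Char) (c : Char) (rest : List Char) :
    pvSplitP prev (c :: rest) =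
      if c = '"' ∧ prev ≠ some '\\' then
        ([], (pvSplitP (some c) rest).1 :: (pvSplitP (some c) rest).2)
      else
        (c :: (pvSplitP (some c) rest).1, (pvSplitP (some c) rest).2) := by
  rw [pvSplitP]

theorem pvRenderP_nil_t (p : List Char) : pvRenderP p [] true = pvSubP p true := rfl
theorem pvRenderP_nil_f (p : List Char) : pvRenderP p [] false = p := rfl
theorem pvRenderP_cons_t (p q : List Char) (qs : List (List Char)) :
    pvRenderP p (q :: qs) true = pvSubP p false ++ '"' :: pvRenderP q qs false := rfl
theorem pvRenderP_cons_f (p q : List Char) (qs : List (List Char)) :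
    pvRenderP p (q :: qs) false = p ++ '"' :: pvRenderP q qs true := rfl

theorem pvDelimOpt_eq_elim (o : Option Char) : pvDelimOpt o = o.elim true pvDelim := by
  cases o <;> rfl

theorem pvDelim_ne_quote (d : Char) (h : pvDelim d = true) : d ≠ '"' := by
  intro hd; subst hd; simp [pvDelim] at h

-- inside segments render verbatim
theorem pvRenderP_cons_inside (c : Char) (p : List Char) (ps : List (List Char)) :
    pvRenderP (c :: p) ps false = c :: pvRenderP p ps false := by
  cases ps <;> rfl

-- structure of pvSplitP's first segment
theorem pvSplitP_spec (cs : List Char) : ∀ (prev : Option Char),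
    ((pvSplitP prev cs).2 = [] ∧ (pvSplitP prev cs).1 = cs) ∨
    (∃ r, cs = (pvSplitP prev cs).1 ++ '"' :: r ∧ (pvSplitP prev cs).2 ≠ []) := by
  induction cs with
  | nil => intro prev; left; simp [pvSplitP]
  | cons c rest ih =>
    intro prev
    by_cases h : c = '"' ∧ prev ≠ some '\\'
    · right
      refine ⟨rest, ?_, ?_⟩
      · simp [pvSplitP_cons, h, h.1]
      · simp [pvSplitP_cons, h]
    · rcases ih (some c) with ⟨h2, h1⟩ | ⟨r, hr, hne⟩
      · left
        simp [pvSplitP_cons, h, h1, h2]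
      · right
        refine ⟨r, ?_, ?_⟩
        · simp only [pvSplitP_cons, if_neg h, List.cons_append]
          rw [← hr]
        · simpa [pvSplitP_cons, h] using hne

-- fire lemma: a '...' at the head of an outside segment whose follower is a delimiter
theorem pvSubP_fire (p2 : List Char) (atEnd : Bool)
    (hc : p2.head?.elim atEnd pvDelim = true) :
    pvSubP ('.' :: '.' :: '.' :: p2) atEnd =
      '"' :: '.' :: '.' :: '.' :: '"' :: pvSubP p2 atEnd := by
  have hcond : ('.' : Char) = '.' ∧ ('.' :: '.' :: p2).take 2 = ['.', '.'] ∧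
      ((('.' :: '.' :: p2).drop 2).head?.elim atEnd pvDelim = true) := ⟨rfl, rfl, hc⟩
  rw [pvSubP_cons, if_pos hcond]
  rfl

-- the heart: pvCore = render ∘ split
theorem pvCore_eq_render (n : Nat) : ∀ (cs : List Char) (prev : Option Char), cs.length ≤ n →
    (pvCore prev cs false = pvRenderP (pvSplitP prev cs).1 (pvSplitP prev cs).2 true ∧
     pvCore prev cs true = pvRenderP (pvSplitP prev cs).1 (pvSplitP prev cs).2 false) := by
  induction n with
  | zero =>
    intro cs prev hlen
    have : cs = [] := by cases cs with | nil => rfl | cons a l => simp at hlen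
    subst this
    simp [pvCore_nil, pvSplitP, pvRenderP_nil_t, pvRenderP_nil_f, pvSubP_nil]
  | succ n ih =>
    intro cs prev hlen
    cases cs with
    | nil => simp [pvCore_nil, pvSplitP, pvRenderP_nil_t, pvRenderP_nil_f, pvSubP_nil]
    | cons c rest =>
      simp only [List.length_cons] at hlen
      by_cases hq : c = '"' ∧ prev ≠ some '\\'
      · obtain ⟨hih1, hih2⟩ := ih rest (some c) (by omega)
        obtain ⟨rfl, hbs⟩ := hq
        have hC : ('"' : Char) = '"' ∧ prev ≠ some '\\' := ⟨rfl, hbs⟩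
        constructor
        · rw [pvCore_cons, if_pos hC, pvSplitP_cons, if_pos hC, pvRenderP_cons_t]
          simp [pvSubP_nil, hih2]
        · rw [pvCore_cons, if_pos hC, pvSplitP_cons, if_pos hC, pvRenderP_cons_f]
          simp [hih1]
      · have hsplit : pvSplitP prev (c :: rest) =
            (c :: (pvSplitP (some c) rest).1, (pvSplitP (some c) rest).2) := by
          rw [pvSplitP_cons, if_neg hq]
        constructor
        · -- outside
          by_cases he : c = '.' ∧ rest.take 2 = ['.', '.'] ∧ pvDelimOpt (rest.drop 2).head? = true
          · -- the ellipsis fires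
            obtain ⟨rfl, ht2, hdel⟩ := he
            obtain ⟨r2, hrest⟩ : ∃ r2, rest = '.' :: '.' :: r2 := by
              cases rest with
              | nil => simp at ht2
              | cons a l =>
                cases l with
                | nil => simp at ht2
                | cons b l2 =>
                  simp only [List.take_succ_cons, List.take_zero] at ht2
                  obtain ⟨rfl, rfl⟩ : a = '.' ∧ b = '.' := by simpa using ht2
                  exact ⟨l2, rfl⟩
            subst hrest
            obtain ⟨hih1, -⟩ := ih r2 (some '.') (by simp only [List.length_cons] at hlen; omega)
            have hC : ('.' : Char) = '.' ∧ (false = false) ∧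
                ('.' :: '.' :: r2).take 2 = ['.', '.'] ∧
                pvDelimOpt (('.' :: '.' :: r2).drop 2).head? = true := ⟨rfl, rfl, ht2, hdel⟩
            rw [pvCore_cons, if_neg hq, if_pos hC]
            have hdot : ¬(('.' : Char) = '"' ∧ (some '.' : Option Char) ≠ some '\\') := by simp
            rw [hsplit]
            have hs2 : pvSplitP (some '.') ('.' :: '.' :: r2) =
                ('.' :: '.' :: (pvSplitP (some '.') r2).1, (pvSplitP (some '.') r2).2) := by
              rw [pvSplitP_cons, if_neg hdot, pvSplitP_cons, if_neg hdot]
            rw [hs2]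
            have hdel2 : pvDelimOpt r2.head? = true := hdel
            have hcond : ∀ (ae : Bool),
                ((pvSplitP (some '.') r2).2 = [] → ae = true) →
                ((pvSplitP (some '.') r2).1.head?.elim ae pvDelim = true) := by
              intro ae hae
              cases r2 with
              | nil => simpa [pvSplitP] using hae rfl
              | cons d r3 =>
                simp only [pvDelimOpt, List.head?_cons] at hdel2
                have hdq : ¬(d = '"' ∧ (some '.' : Option Char) ≠ some '\\') := by
                  intro hh; exact pvDelim_ne_quote d hdel2 hh.1
                rw [pvSplitP_cons, if_neg hdq]
                simpa using hdel2
            cases hps : (pvSplitP (some '.') r2).2 with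
            | nil =>
              rw [hps] at hcond
              rw [pvRenderP_nil_t, pvSubP_fire _ _ (hcond true (fun _ => rfl))]
              rw [show List.drop 2 ('.' :: '.' :: r2) = r2 from rfl, hih1, hps, pvRenderP_nil_t]
            | cons q qs =>
              rw [hps] at hcond
              rw [pvRenderP_cons_t, pvSubP_fire _ _ (hcond false (by simp))]
              rw [show List.drop 2 ('.' :: '.' :: r2) = r2 from rfl, hih1, hps, pvRenderP_cons_t]
              rfl
          · -- no fire: copy c
            have heC : ¬(c = '.' ∧ (false = false) ∧ rest.take 2 = ['.', '.'] ∧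
                pvDelimOpt (rest.drop 2).head? = true) := by
              intro ⟨h1, _, h3, h4⟩; exact he ⟨h1, h3, h4⟩
            rw [pvCore_cons, if_neg hq, if_neg heC]
            obtain ⟨hih1, -⟩ := ih rest (some c) (by omega)
            rw [hsplit]
            dsimp only
            rcases pvSplitP_spec rest (some c) with ⟨hps, hfst⟩ | ⟨r, hr, hne⟩
            · rw [hps] at hih1 ⊢
              rw [hfst] at hih1 ⊢
              rw [hih1, pvRenderP_nil_t, pvRenderP_nil_t]
              have hno : ¬(c = '.' ∧ rest.take 2 = ['.', '.'] ∧
                  ((rest.drop 2).head?.elim true pvDelim = true)) := by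
                intro ⟨h1, h2, h3⟩
                exact he ⟨h1, h2, by rw [pvDelimOpt_eq_elim]; exact h3⟩
              rw [pvSubP_cons, if_neg hno]
            · cases hps : (pvSplitP (some c) rest).2 with
              | nil => exact absurd hps hne
              | cons q qs =>
                rw [hps] at hih1
                rw [hih1, pvRenderP_cons_t, pvRenderP_cons_t]
                have hno : ¬(c = '.' ∧ (pvSplitP (some c) rest).1.take 2 = ['.', '.'] ∧
                    (((pvSplitP (some c) rest).1.drop 2).head?.elim false pvDelim = true)) := by
                  intro ⟨h1, h2, h3⟩
                  have hlen2 : 2 ≤ (pvSplitP (some c) rest).1.length := by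
                    have := congrArg List.length h2
                    simp at this
                    omega
                  have ht2' : rest.take 2 = ['.', '.'] := by
                    rw [hr, List.take_append_of_le_length hlen2, h2]
                  cases hfd : (pvSplitP (some c) rest).1.drop 2 with
                  | nil => rw [hfd] at h3; simp at h3
                  | cons e t =>
                    rw [hfd] at h3
                    simp only [List.head?_cons, Option.elim] at h3
                    have hd2 : (rest.drop 2).head? = some e := by
                      rw [hr, List.drop_append_of_le_length hlen2, hfd]
                      rfl
                    exact he ⟨h1, ht2', by rw [hd2]; simpa [pvDelimOpt] using h3⟩
                rw [pvSubP_cons, if_neg hno]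
                rfl
        · -- inside: copy c verbatim
          rw [pvCore_cons, if_neg hq, if_neg (by intro ⟨_, hf, _⟩; simp at hf)]
          obtain ⟨-, hih2⟩ := ih rest (some c) (by omega)
          rw [hsplit, hih2, pvRenderP_cons_inside]

-- A's loop equals pvCore on the suffix
theorem pvALoop_eq_core (s : List Char) (k : Nat) : ∀ (i : Nat) (inStr : Bool) (acc : List Char),
    s.length - i ≤ k →
    pvALoop s i inStr acc =
      acc ++ pvCore (if i = 0 then none else some (s[i-1]!)) (s.drop i) inStr := by
  induction k with
  | zero =>
    intro i inStr acc hk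
    rw [pvALoop, dif_neg (by omega)]
    rw [List.drop_eq_nil_of_le (by omega), pvCore_nil, List.append_nil]
  | succ k ih =>
    intro i inStr acc hk
    by_cases h : i < s.length
    · have hdrop : s.drop i = s[i] :: s.drop (i+1) := List.drop_eq_getElem_cons h
      have hprev1 : (some (s[i+1-1]!) : Option Char) = some s[i] := by
        rw [show i + 1 - 1 = i from rfl, getElem!_pos s i h]
      rw [pvALoop, dif_pos h]
      by_cases hqA : s[i] = '"' ∧ (i = 0 ∨ s[i-1]! ≠ '\\')
      · -- quote: toggle
        have hqC : s[i] = '"' ∧ (if i = 0 then (none : Option Char) else some (s[i-1]!)) ≠ some '\\' := by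
          refine ⟨hqA.1, ?_⟩
          rcases hqA.2 with h0 | hne
          · simp [h0]
          · by_cases h0 : i = 0
            · simp [h0]
            · rw [if_neg h0]; simpa using hne
        rw [if_pos hqA, ih (i+1) (!inStr) _ (by omega)]
        rw [hdrop, pvCore_cons, if_pos hqC, hprev1, hqA.1]
        simp
      · have hqC : ¬(s[i] = '"' ∧ (if i = 0 then (none : Option Char) else some (s[i-1]!)) ≠ some '\\') := by
          intro ⟨h1, h2⟩
          apply hqA
          refine ⟨h1, ?_⟩
          by_cases h0 : i = 0
          · exact Or.inl h0
          · right; rw [if_neg h0] at h2; intro hh; exact h2 (by rw [hh])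
        by_cases hd : s[i] = '.' ∧ inStr = false ∧ (s.drop i).take 3 = ['.', '.', '.']
        · rw [if_neg hqA, if_pos hd]
          have hlen3 : i + 3 ≤ s.length := by
            have := congrArg List.length hd.2.2
            simp at this
            omega
          have htail : (s.drop (i+1)).take 2 = ['.', '.'] := by
            have h3 := hd.2.2
            rw [hdrop, List.take_succ_cons] at h3
            simp only [List.cons.injEq] at h3
            exact h3.2
          have hdd : (s.drop (i+1)).drop 2 = s.drop (i+3) := by
            rw [List.drop_drop]
          have hAfterIff :
              ((if i + 3 < s.length then (s.drop (i+3)).take 1 else []) = [] ∨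
               (if i + 3 < s.length then (s.drop (i+3)).take 1 else []) = [' '] ∨
               (if i + 3 < s.length then (s.drop (i+3)).take 1 else []) = ['\t'] ∨
               (if i + 3 < s.length then (s.drop (i+3)).take 1 else []) = ['\n'] ∨
               (if i + 3 < s.length then (s.drop (i+3)).take 1 else []) = ['\r'] ∨
               (if i + 3 < s.length then (s.drop (i+3)).take 1 else []) = [','] ∨
               (if i + 3 < s.length then (s.drop (i+3)).take 1 else []) = ['}'] ∨
               (if i + 3 < s.length then (s.drop (i+3)).take 1 else []) = [']']) ↔
              pvDelimOpt (s.drop (i+3)).head? = true := by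
            by_cases h3 : i + 3 < s.length
            · have hdr3 : s.drop (i+3) = s[i+3] :: s.drop (i+4) := List.drop_eq_getElem_cons h3
              rw [hdr3]
              simp only [if_pos h3, List.take_succ_cons, List.take_zero, List.head?_cons,
                pvDelimOpt, pvDelim]
              simp [List.cons.injEq]
              tauto
            · have : s.drop (i+3) = [] := List.drop_eq_nil_of_le (by omega)
              rw [this]
              simp [pvDelimOpt, h3]
          by_cases ha : (if i + 3 < s.length then (s.drop (i+3)).take 1 else []) = [] ∨
               (if i + 3 < s.length then (s.drop (i+3)).take 1 else []) = [' '] ∨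
               (if i + 3 < s.length then (s.drop (i+3)).take 1 else []) = ['\t'] ∨
               (if i + 3 < s.length then (s.drop (i+3)).take 1 else []) = ['\n'] ∨
               (if i + 3 < s.length then (s.drop (i+3)).take 1 else []) = ['\r'] ∨
               (if i + 3 < s.length then (s.drop (i+3)).take 1 else []) = [','] ∨
               (if i + 3 < s.length then (s.drop (i+3)).take 1 else []) = ['}'] ∨
               (if i + 3 < s.length then (s.drop (i+3)).take 1 else []) = [']']
          · -- quoted ellipsis emitted
            rw [if_pos ha, ih (i+3) inStr _ (by omega)]
            have hdot2 : s[i+2] = '.' := by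
              have h3 := hd.2.2
              rw [hdrop, List.take_succ_cons,
                  List.drop_eq_getElem_cons (show i+1 < s.length by omega), List.take_succ_cons,
                  List.drop_eq_getElem_cons (show i+2 < s.length by omega), List.take_succ_cons,
                  List.take_zero] at h3
              simp only [List.cons.injEq] at h3
              exact h3.2.2.1
            have hprev3 : (some (s[i+3-1]!) : Option Char) = some '.' := by
              rw [show i + 3 - 1 = i + 2 from rfl, getElem!_pos s (i+2) (show i+2 < s.length by omega)]
              exact congrArg some hdot2
            have hC : s[i] = '.' ∧ inStr = false ∧ (s.drop (i+1)).take 2 = ['.', '.'] ∧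
                pvDelimOpt ((s.drop (i+1)).drop 2).head? = true :=
              ⟨hd.1, hd.2.1, htail, by rw [hdd]; exact hAfterIff.1 ha⟩
            rw [hdrop, pvCore_cons, if_neg hqC, if_pos hC, hprev3, hdd]
            simp
          · -- dot copied
            rw [if_neg ha, ih (i+1) inStr _ (by omega)]
            have hnofire : ¬(s[i] = '.' ∧ inStr = false ∧ (s.drop (i+1)).take 2 = ['.', '.'] ∧
                pvDelimOpt ((s.drop (i+1)).drop 2).head? = true) := by
              intro hfc
              apply ha
              apply hAfterIff.2
              have h4 := hfc.2.2.2
              rwa [hdd] at h4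
            rw [hdrop, pvCore_cons, if_neg hqC, if_neg hnofire, hprev1]
            simp
        · rw [if_neg hqA, if_neg hd, ih (i+1) inStr _ (by omega)]
          have hnofire : ¬(s[i] = '.' ∧ inStr = false ∧ (s.drop (i+1)).take 2 = ['.', '.'] ∧
              pvDelimOpt ((s.drop (i+1)).drop 2).head? = true) := by
            intro hfc
            refine hd ⟨hfc.1, hfc.2.1, ?_⟩
            rw [hdrop, List.take_succ_cons, hfc.2.2.1, hfc.1]
          rw [hdrop, pvCore_cons, if_neg hqC, if_neg hnofire, hprev1]
          simp
    · rw [pvALoop, dif_neg h]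
      rw [List.drop_eq_nil_of_le (by omega), pvCore_nil, List.append_nil]

-- B's sub loop equals pvSubP on the suffix
theorem pvSubLoop_eq_subP (p : List Char) (k : Nat) : ∀ (i : Nat) (atEnd : Bool) (out : List Char),
    p.length - i ≤ k →
    pvSubLoop p i atEnd out = out ++ pvSubP (p.drop i) atEnd := by
  induction k with
  | zero =>
    intro i atEnd out hk
    rw [pvSubLoop, dif_neg (by omega)]
    rw [List.drop_eq_nil_of_le (by omega), pvSubP_nil, List.append_nil]
  | succ k ih =>
    intro i atEnd out hk
    by_cases h : i < p.length
    · have hdrop : p.drop i = p[i] :: p.drop (i+1) := List.drop_eq_getElem_cons h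
      have hdd : (p.drop (i+1)).drop 2 = p.drop (i+3) := by rw [List.drop_drop]
      have hAfterIff :
          (if i + 3 < p.length then (p[i+3]! ∈ [' ', '\t', '\n', '\r', ',', '}', ']']) else atEnd = true) ↔
          ((p.drop (i+3)).head?.elim atEnd pvDelim = true) := by
        by_cases h3 : i + 3 < p.length
        · rw [if_pos h3]
          have hh : (p.drop (i+3)).head? = some p[i+3] := by
            rw [List.drop_eq_getElem_cons h3]; rfl
          rw [hh, getElem!_pos p (i+3) h3]
          simp only [Option.elim]
          simp [pvDelim]
          tauto
        · rw [if_neg h3]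
          have : p.drop (i+3) = [] := List.drop_eq_nil_of_le (by omega)
          rw [this]
          simp
      rw [pvSubLoop, dif_pos h]
      by_cases hc : p[i] = '.' ∧ ((p.drop (i+1)).take 2 = ['.', '.']) ∧
          (if i + 3 < p.length then (p[i+3]! ∈ [' ', '\t', '\n', '\r', ',', '}', ']']) else atEnd = true)
      · rw [if_pos hc, ih (i+3) atEnd _ (by omega)]
        have hC : p[i] = '.' ∧ (p.drop (i+1)).take 2 = ['.', '.'] ∧
            (((p.drop (i+1)).drop 2).head?.elim atEnd pvDelim = true) :=
          ⟨hc.1, hc.2.1, by rw [hdd]; exact hAfterIff.1 hc.2.2⟩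
        rw [hdrop, pvSubP_cons, if_pos hC]
        rw [hdd]
        simp
      · rw [if_neg hc, ih (i+1) atEnd _ (by omega)]
        rw [hdrop, pvSubP_cons, if_neg (by
          intro ⟨h1, h2, h3⟩
          exact hc ⟨h1, h2, hAfterIff.2 (by rwa [hdd] at h3)⟩)]
        simp
    · rw [pvSubLoop, dif_neg h]
      rw [List.drop_eq_nil_of_le (by omega), pvSubP_nil, List.append_nil]

-- B's split loop equals pvSplitP
theorem pvSplitGo_eq_splitP (cs : List Char) : ∀ (prev : Option Char) (cur : List Char)
    (parts : List (List Char)),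
    pvSplitGo cs prev cur parts =
      parts ++ (cur ++ (pvSplitP prev cs).1) :: (pvSplitP prev cs).2 := by
  induction cs with
  | nil => intro prev cur parts; simp [pvSplitGo, pvSplitP]
  | cons c rest ih =>
    intro prev cur parts
    by_cases h : c = '"' ∧ prev ≠ some '\\'
    · rw [pvSplitGo, if_pos h, ih, pvSplitP_cons, if_pos h]
      simp
    · rw [pvSplitGo, if_neg h, ih, pvSplitP_cons, if_neg h]
      simp

-- B's join loop equals pvRenderP
theorem pvBGo_eq_renderP (ps : List (List Char)) : ∀ (p : List Char) (idx total : Nat),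
    total = idx + ps.length + 1 →
    List.flatten (List.intersperse ['"'] (pvBGo (p :: ps) idx total)) =
      pvRenderP p ps (decide (idx % 2 = 0)) := by
  induction ps with
  | nil =>
    intro p idx total h
    have hlast : decide (idx = total - 1) = true := by subst h; simp
    rw [pvBGo, pvBGo]
    rw [pvSubLoop_eq_subP p p.length 0 (decide (idx = total - 1)) [] (by omega), hlast]
    by_cases hp : idx % 2 = 0 <;>
      simp [hp, pvRenderP_nil_t, pvRenderP_nil_f]
  | cons q qs ih =>
    intro p idx total h
    have hnotlast : decide (idx = total - 1) = false := by
      simp only [decide_eq_false_iff_not]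
      subst h
      simp only [List.length_cons]
      omega
    have hflip : (decide ((idx + 1) % 2 = 0)) = !decide (idx % 2 = 0) := by
      rcases Nat.mod_two_eq_zero_or_one idx with hm | hm
      · simp [hm, show (idx+1) % 2 = 1 from by omega]
      · simp [hm, show (idx+1) % 2 = 0 from by omega]
    rw [pvBGo]
    rw [show pvBGo (q :: qs) (idx + 1) total =
        (if (idx+1) % 2 = 0 then pvSubLoop q 0 (decide (idx+1 = total - 1)) [] else q)
          :: pvBGo qs (idx + 1 + 1) total from by rw [pvBGo]]
    rw [List.intersperse_cons₂]
    rw [show ((if (idx+1) % 2 = 0 then pvSubLoop q 0 (decide (idx+1 = total - 1)) [] else q)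
          :: pvBGo qs (idx + 1 + 1) total) = pvBGo (q :: qs) (idx + 1) total from by rw [pvBGo]]
    rw [List.flatten_cons, List.flatten_cons]
    rw [ih q (idx + 1) total (by simp only [List.length_cons] at h ⊢; omega)]
    rw [pvSubLoop_eq_subP p p.length 0 (decide (idx = total - 1)) [] (by omega), hnotlast]
    rw [hflip]
    by_cases hp : idx % 2 = 0 <;>
      simp [hp, pvRenderP_cons_t, pvRenderP_cons_f]

-- ===== VERDICT (by name: the statement is the Claim_ definition above) =====
theorem quote_unquoted_ellipsis_py_spec : Claim_equal_quote_unquoted_ellipsis_py := by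
  intro s _
  unfold Spec_quote_unquoted_ellipsis_py
  show String.ofList (pvALoop s.toList 0 false []) =
    String.ofList (List.flatten (List.intersperse ['"']
      (pvBGo (pvSplitGo s.toList none [] []) 0 (pvSplitGo s.toList none [] []).length)))
  rw [pvALoop_eq_core s.toList s.toList.length 0 false [] (by omega)]
  rw [pvSplitGo_eq_splitP s.toList none [] []]
  rw [show (if (0:Nat) = 0 then (none : Option Char) else some (s.toList[0-1]!)) = none from rfl]
  rw [List.drop_zero, List.nil_append]
  rw [(pvCore_eq_render s.toList.length s.toList none le_rfl).1]
  simp only [List.nil_append]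
  rw [pvBGo_eq_renderP (pvSplitP none s.toList).2 (pvSplitP none s.toList).1 0
        ((pvSplitP none s.toList).1 :: (pvSplitP none s.toList).2).length (by simp)]
  rfl
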